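-- pv_equiv track=rewrite | github.com/Mohtelsayed/HeaderFootball | chatCommClass.py | helperBlockASCIIGenerate
-- ===== SOURCE A (Python) =====
-- def helperBlockASCIIGenerate(password,challenge):
--     passSize = len(password)
--     chalSize = len(challenge)
--     message = password+challenge
--     block = message + "1"
--     while len(block) + len(message) + 3 <= 512:
--         block += message
--     block += ("0"* (509-len(block))) + (
--         "0" * (3-len(str(passSize + chalSize))))+ str(passSize + chalSize)
--     M = []
--     for i in range(16):
--         sumASCII = 0
--         for j in range(32):
--             sumASCII += ord(block[(32*i)+j])
--         M += [sumASCII]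
--     return block, M
-- ===== SOURCE B (Python) =====
-- def helperBlockASCIIGenerate(password, challenge):
--     passSize = len(password)
--     chalSize = len(challenge)
--     message = password + challenge
--     # closed-form repetition count instead of A's while loop
--     reps = max(508 // len(message) - 1, 0)
--     block = message + "1" + message * reps
--     total = str(passSize + chalSize)
--     block += "0" * (509 - len(block)) + "0" * (3 - len(total)) + total
--     # prefix sums over the ASCII codes; each of the 16 block sums by subtraction
--     pre = [0]
--     for ch in block:
--         pre.append(pre[-1] + ord(ch))
--     M = [pre[32 * (i + 1)] - pre[32 * i] for i in range(16)]
--     return block, M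
-- ===== Notes on version B (the rewrite author's own statement) =====
-- stated objective: alternative
-- what changed: The while-loop that repeats the message is replaced by a closed-form repetition count (508 // len(message) - 1), and the 16 nested 32-char re-summations are replaced by one prefix-sum array over the block with each block sum obtained by subtraction.
import Mathlib
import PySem

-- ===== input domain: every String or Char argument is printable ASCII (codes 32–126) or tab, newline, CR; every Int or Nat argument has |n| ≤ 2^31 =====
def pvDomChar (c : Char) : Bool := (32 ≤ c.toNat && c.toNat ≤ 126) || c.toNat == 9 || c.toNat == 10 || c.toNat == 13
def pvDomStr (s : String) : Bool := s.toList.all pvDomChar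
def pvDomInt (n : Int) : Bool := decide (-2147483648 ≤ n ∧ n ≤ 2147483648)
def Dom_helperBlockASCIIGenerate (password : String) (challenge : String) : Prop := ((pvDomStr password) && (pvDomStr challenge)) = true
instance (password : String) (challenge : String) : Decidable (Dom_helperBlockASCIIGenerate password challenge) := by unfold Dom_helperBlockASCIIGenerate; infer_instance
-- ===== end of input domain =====

-- B replaces A's message-repeating while-loop by a closed-form repetition count and A's 16 nested
-- 32-char re-summations by one prefix-sum array with block sums taken by subtraction; same results.

-- ord(c) on this domain
def pvOrd (c : Char) : Int := (c.toNat : Int)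

-- ===== PORT A =====
-- 'while len(block) + len(message) + 3 <= 512: block += message'; fuel 512 is enough for every
-- nonempty message (at most 507 appends happen); on the empty message Python diverges (excluded by Pre_)
def pvLoopA (m : List Char) : Nat → List Char → List Char
  | 0, b => b
  | f+1, b => if b.length + m.length + 3 ≤ 512 then pvLoopA m f (b ++ m) else b

def helperBlockASCIIGenerate (password : String) (challenge : String) : String × List Int :=
  let passSize : Int := PySem.Str.len password
  let chalSize : Int := PySem.Str.len challenge
  let message := password.toList ++ challenge.toList
  let block1 := pvLoopA message 512 (message ++ ['1'])
  let digits := PySem.Int.toChars (passSize + chalSize)      -- str(passSize + chalSize)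
  let block := block1 ++ List.replicate (509 - block1.length) '0'
               ++ List.replicate (3 - digits.length) '0' ++ digits
  -- indices 32*i+j are always in range (the block has ≥ 512 chars), so pyGetD's default is never used
  let M := (PySem.List.pyRange 0 16).foldl (fun M i =>
      M ++ [(PySem.List.pyRange 0 32).foldl
              (fun s j => s + pvOrd (PySem.List.pyGetD block (32*i + j) '0')) 0]) []
  (String.ofList block, M)

-- ===== PORT B =====
def helperBlockASCIIGenerate_alt (password : String) (challenge : String) : String × List Int :=
  let passSize : Int := PySem.Str.len password
  let chalSize : Int := PySem.Str.len challenge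
  let message := password.toList ++ challenge.toList
  -- 508 // len(message): Python raises ZeroDivisionError on the empty message (excluded by Pre_)
  let reps : Int := max (PySem.Int.floordiv 508 (message.length : Int) - 1) 0
  let block1 := message ++ ['1'] ++ (List.replicate reps.toNat message).flatten   -- message * reps
  let digits := PySem.Int.toChars (passSize + chalSize)      -- str(passSize + chalSize)
  let block := block1 ++ List.replicate (509 - block1.length) '0'
               ++ List.replicate (3 - digits.length) '0' ++ digits
  let pre := block.foldl (fun acc ch => acc ++ [PySem.List.pyGetD acc (-1) 0 + pvOrd ch]) [(0:Int)]
  let M := (PySem.List.pyRange 0 16).map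
      (fun i => PySem.List.pyGetD pre (32*(i+1)) 0 - PySem.List.pyGetD pre (32*i) 0)
  (String.ofList block, M)

-- ===== PRECONDITION & SPEC =====
-- Pre_ excludes only the input with password and challenge both empty: there A's while-loop never
-- terminates (and B's Python raises ZeroDivisionError); A returns on every other input.
def Pre_helperBlockASCIIGenerate (password : String) (challenge : String) : Prop :=
  password.toList ++ challenge.toList ≠ []
instance (password : String) (challenge : String) : Decidable (Pre_helperBlockASCIIGenerate password challenge) := by unfold Pre_helperBlockASCIIGenerate; infer_instance
def pvWitness_helperBlockASCIIGenerate : String × String := ("ab", "c")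

def Spec_helperBlockASCIIGenerate (password : String) (challenge : String) (out : String × List Int) : Prop := out = helperBlockASCIIGenerate_alt password challenge
instance (password : String) (challenge : String) (out : String × List Int) : Decidable (Spec_helperBlockASCIIGenerate password challenge out) := by unfold Spec_helperBlockASCIIGenerate; infer_instance

-- ===== CLAIM (what is proved, stated in full; the proofs are below) =====
def Claim_equal_helperBlockASCIIGenerate : Prop := ∀ (password : String) (challenge : String), Dom_helperBlockASCIIGenerate password challenge → Pre_helperBlockASCIIGenerate password challenge → Spec_helperBlockASCIIGenerate password challenge (helperBlockASCIIGenerate password challenge)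

-- ===== LEMMAS AND PROOFS =====

-- number of appends A's while-loop performs starting from a block of length L
def pvCnt (mlen L : Nat) : Nat := if L + mlen + 3 ≤ 512 then (509 - mlen - L) / mlen + 1 else 0

theorem pvCnt_step (mlen L : Nat) (hm : 1 ≤ mlen) (h : L + mlen + 3 ≤ 512) :
    pvCnt mlen (L + mlen) = pvCnt mlen L - 1 := by
  unfold pvCnt
  rw [if_pos h]
  by_cases h2 : L + mlen + mlen + 3 ≤ 512
  · rw [if_pos h2]
    have hd := Nat.add_div_right (509 - mlen - (L + mlen)) (show 0 < mlen by omega)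
    have hx : 509 - mlen - (L + mlen) + mlen = 509 - mlen - L := by omega
    rw [hx] at hd
    rw [hd]; simp
  · rw [if_neg h2]
    have : (509 - mlen - L) / mlen = 0 := Nat.div_eq_of_lt (by omega)
    omega

theorem pvLoopA_eq (m : List Char) (hm : 1 ≤ m.length) :
    ∀ (f : Nat) (b : List Char), pvCnt m.length b.length ≤ f →
      pvLoopA m f b = b ++ (List.replicate (pvCnt m.length b.length) m).flatten := by
  intro f
  induction f with
  | zero =>
    intro b hb
    have h0 : pvCnt m.length b.length = 0 := Nat.le_zero.mp hb
    simp [pvLoopA, h0]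
  | succ f ih =>
    intro b hb
    by_cases hc : b.length + m.length + 3 ≤ 512
    · have hpos : 1 ≤ pvCnt m.length b.length := by
        unfold pvCnt; rw [if_pos hc]; exact Nat.succ_le_succ (Nat.zero_le _)
      have hstep : pvCnt m.length (b.length + m.length) = pvCnt m.length b.length - 1 :=
        pvCnt_step m.length b.length hm hc
      have hlen : (b ++ m).length = b.length + m.length := by simp
      have ih' := ih (b ++ m) (by rw [hlen, hstep]; omega)
      rw [hlen, hstep] at ih'
      have hrepl : List.replicate (pvCnt m.length b.length) m
          = m :: List.replicate (pvCnt m.length b.length - 1) m := by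
        rw [← List.replicate_succ]
        congr 1
        omega
      simp only [pvLoopA, if_pos hc]
      rw [ih', hrepl]
      simp [List.append_assoc]
    · have h0 : pvCnt m.length b.length = 0 := by
        unfold pvCnt; rw [if_neg hc]
      simp only [pvLoopA, if_neg hc, h0, List.replicate_zero, List.flatten_nil, List.append_nil]

theorem pvCnt_le (mlen L : Nat) (hm : 1 ≤ mlen) : pvCnt mlen L ≤ 512 := by
  unfold pvCnt
  split
  · have := Nat.div_le_self (509 - mlen - L) mlen
    omega
  · omega

-- the closed-form repetition count equals the loop count
theorem pvCnt_closed (mlen : Nat) (hm : 1 ≤ mlen) :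
    pvCnt mlen (mlen + 1) = (max (PySem.Int.floordiv 508 (mlen : Int) - 1) 0).toNat := by
  have h508 : (508 : Int) = ((508 : Nat) : Int) := by norm_num
  rw [h508, PySem.Int.floordiv_natCast]
  unfold pvCnt
  by_cases hc : mlen + 1 + mlen + 3 ≤ 512
  · rw [if_pos hc]
    have h2 : mlen * 2 ≤ 508 := by omega
    have hsub : (508 - mlen * 2) / mlen = 508 / mlen - 2 := Nat.sub_mul_div 508 mlen 2
    have hge : 2 ≤ 508 / mlen := (Nat.le_div_iff_mul_le (by omega)).mpr (by omega)
    have hx : 509 - mlen - (mlen + 1) = 508 - mlen * 2 := by omega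
    rw [hx, hsub]
    omega
  · rw [if_neg hc]
    have : 508 / mlen < 2 := (Nat.div_lt_iff_lt_mul (by omega)).mpr (by omega)
    omega

-- partial ASCII sums of a char list
def pvS (l : List Char) (k : Nat) : Int := ((l.take k).map pvOrd).sum

def pvSums : List Char → Int → List Int
  | [], _ => []
  | c :: l, s => (s + pvOrd c) :: pvSums l (s + pvOrd c)

theorem pvFold_eq (l : List Char) : ∀ (acc : List Int) (h : acc ≠ []),
    l.foldl (fun acc ch => acc ++ [PySem.List.pyGetD acc (-1) 0 + pvOrd ch]) acc
      = acc ++ pvSums l (acc.getLast h) := by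
  induction l with
  | nil => intro acc h; simp [pvSums]
  | cons c l ih =>
    intro acc h
    have hne : acc ++ [acc.getLast h + pvOrd c] ≠ [] := by simp
    have hlast : (acc ++ [acc.getLast h + pvOrd c]).getLast hne = acc.getLast h + pvOrd c :=
      List.getLast_append_singleton _
    simp only [List.foldl_cons, PySem.List.pyGetD_neg_one acc 0 h]
    rw [ih (acc ++ [acc.getLast h + pvOrd c]) hne, hlast]
    simp [pvSums]

theorem pvSums_eq_map (l : List Char) : ∀ (s : Int),
    pvSums l s = (List.range l.length).map (fun k => s + pvS l (k + 1)) := by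
  induction l with
  | nil => intro s; simp [pvSums]
  | cons c l ih =>
    intro s
    rw [List.length_cons, List.range_succ_eq_map, List.map_cons, List.map_map]
    simp only [pvSums, ih (s + pvOrd c)]
    refine List.cons_eq_cons.mpr ⟨by simp [pvS], ?_⟩
    refine List.map_congr_left ?_
    intro k hk
    simp only [Function.comp_apply, pvS, List.take_succ_cons, List.map_cons, List.sum_cons]
    ring

-- B's prefix list is the table of partial sums
theorem pvPre_eq (l : List Char) :
    l.foldl (fun acc ch => acc ++ [PySem.List.pyGetD acc (-1) 0 + pvOrd ch]) [(0:Int)]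
      = (List.range (l.length + 1)).map (pvS l) := by
  rw [pvFold_eq l [(0:Int)] (by simp)]
  rw [List.range_succ_eq_map, List.map_cons, List.map_map]
  simp only [List.getLast_singleton]
  rw [pvSums_eq_map]
  simp [pvS]

-- A's inner 32-char summation equals a difference of partial sums
theorem pvWindow (l : List Char) (a : Nat) : ∀ (n : Nat), a + n ≤ l.length →
    (List.range n).foldl (fun (s : Int) (k : Nat) => s + pvOrd (PySem.List.pyGetD l ((a : Int) + (k : Int)) '0')) 0
      = pvS l (a + n) - pvS l a := by
  intro n
  induction n with
  | zero => intro h; simp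
  | succ n ih =>
    intro h
    rw [List.range_succ, List.foldl_append]
    rw [ih (by omega)]
    have hcast : (a : Int) + (n : Int) = ((a + n : Nat) : Int) := by push_cast; ring
    rw [List.foldl_cons, List.foldl_nil, hcast, PySem.List.pyGetD_natCast]
    have hlt : a + n < l.length := by omega
    have hget : l.getD (a + n) '0' = l[a + n] := List.getD_eq_getElem l '0' hlt
    have htake : l.take (a + n + 1) = l.take (a + n) ++ [l[a + n]] := by
      rw [List.take_add_one]
      simp [List.getElem?_eq_getElem hlt]
    rw [hget]
    have hS : pvS l (a + (n+1)) = pvS l (a+n) + pvOrd l[a + n] := by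
      unfold pvS
      rw [show a + (n+1) = a + n + 1 by omega, htake, List.map_append, List.sum_append]
      simp
    rw [hS]
    ring

-- the two M computations agree on any block of at least 512 characters
theorem pvM_eq (block : List Char) (hlen : 512 ≤ block.length) :
    (PySem.List.pyRange 0 16).foldl (fun M i =>
      M ++ [(PySem.List.pyRange 0 32).foldl
              (fun s j => s + pvOrd (PySem.List.pyGetD block (32*i + j) '0')) 0]) []
    = (PySem.List.pyRange 0 16).map (fun i =>
        PySem.List.pyGetD (block.foldl (fun acc ch => acc ++ [PySem.List.pyGetD acc (-1) 0 + pvOrd ch]) [(0:Int)]) (32*(i+1)) 0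
        - PySem.List.pyGetD (block.foldl (fun acc ch => acc ++ [PySem.List.pyGetD acc (-1) 0 + pvOrd ch]) [(0:Int)]) (32*i) 0) := by
  rw [PySem.List.foldl_append_singleton_eq_map, List.nil_append, pvPre_eq]
  refine List.map_congr_left ?_
  intro i hi
  have hi' : 0 ≤ i ∧ i < 16 := PySem.List.mem_pyRange_one.mp hi
  have hki : i = ((i.toNat : Nat) : Int) := (Int.toNat_of_nonneg hi'.1).symm
  have hkil : i.toNat < 16 := by omega
  -- right side: two table lookups
  have hub : ∀ (k : Nat), k ≤ 512 → ((List.range (block.length + 1)).map (pvS block)).getD k 0 = pvS block k := by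
    intro k hk
    exact PySem.List.getD_map_range (pvS block) (block.length + 1) k 0 (by omega)
  have hr1 : 32*(i+1) = ((32*(i.toNat + 1) : Nat) : Int) := by omega
  have hr0 : 32*i = ((32*(i.toNat) : Nat) : Int) := by omega
  rw [hr1, hr0, PySem.List.pyGetD_natCast, PySem.List.pyGetD_natCast,
      hub _ (by omega), hub _ (by omega)]
  -- left side: unfold the inner range-loop into a window sum
  have hrange : PySem.List.pyRange 0 32 = (List.range 32).map (fun (k : Nat) => (0:Int) + k) := by
    rw [PySem.List.pyRange_one]; rw [show ((32:Int) - 0).toNat = 32 from by decide]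
  rw [hrange, List.foldl_map]
  simp only [zero_add]
  rw [pvWindow block (32*i.toNat) 32 (by omega),
      show 32*i.toNat + 32 = 32*(i.toNat + 1) by ring]

-- any padded block has at least 512 characters
theorem pvBlockLen (blk1 digits : List Char) :
    512 ≤ (blk1 ++ List.replicate (509 - blk1.length) '0'
           ++ List.replicate (3 - digits.length) '0' ++ digits).length := by
  simp [List.length_append, List.length_replicate]
  omega

-- ===== VERDICT (by name: the statement is the Claim_ definition above) =====
theorem helperBlockASCIIGenerate_spec : Claim_equal_helperBlockASCIIGenerate := by
  intro password challenge hdom hpre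
  unfold Spec_helperBlockASCIIGenerate
  unfold helperBlockASCIIGenerate helperBlockASCIIGenerate_alt
  simp only []
  set message := password.toList ++ challenge.toList with hmsg
  have hm : 1 ≤ message.length := by
    rcases message with _ | ⟨c, l⟩
    · exact absurd hmsg.symm hpre
    · simp
  have hfuel : pvCnt message.length (message ++ ['1']).length ≤ 512 := pvCnt_le _ _ hm
  have hb1 : pvLoopA message 512 (message ++ ['1'])
      = (message ++ ['1']) ++ (List.replicate (pvCnt message.length (message ++ ['1']).length) message).flatten :=
    pvLoopA_eq message hm 512 (message ++ ['1']) hfuel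
  have hlen1 : (message ++ ['1']).length = message.length + 1 := by simp
  have hcnt : pvCnt message.length (message ++ ['1']).length
      = (max (PySem.Int.floordiv 508 (message.length : Int) - 1) 0).toNat := by
    rw [hlen1]; exact pvCnt_closed message.length hm
  have hblock1 : pvLoopA message 512 (message ++ ['1'])
      = message ++ ['1'] ++ (List.replicate ((max (PySem.Int.floordiv 508 (message.length : Int) - 1) 0).toNat) message).flatten := by
    rw [hb1, hcnt]
  rw [hblock1]
  refine Prod.ext rfl ?_
  exact pvM_eq _ (pvBlockLen _ _)
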